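-- pv_equiv track=rewrite | github.com/tsampi/tsampi-0 | tsampi/pypy/lib_python-bak/mock_open.py | _iterate_read_data
-- ===== SOURCE A (Python) =====
-- def _iterate_read_data(read_data):
--     # Helper for mock_open:
--     # Retrieve lines from read_data via a generator so that separate calls to
--     # readline, read, and readlines are properly interleaved
--     data_as_list = ['{0}\n'.format(l) for l in read_data.split('\n')]
--
--     if data_as_list[-1] == '\n':
--         # If the last line ended in a newline, the list comprehension will have an
--         # extra entry that's just a newline.  Remove this.
--         data_as_list = data_as_list[:-1]
--     else:
--         # If there wasn't an extra newline by itself, then the file being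
--         # emulated doesn't have a newline to end the last line  remove the
--         # newline that our naive format() added
--         data_as_list[-1] = data_as_list[-1][:-1]
--
--     for line in data_as_list:
--         yield line
-- ===== SOURCE B (Python) =====
-- import re
--
-- def _iterate_read_data(read_data):
--     # Tokenize directly: each piece is a newline-free run plus its '\n',
--     # or the final newline-less fragment.
--     for piece in re.findall(r'[^\n]*\n|[^\n]+', read_data):
--         yield piece
-- ===== Notes on version B (the rewrite author's own statement) =====
-- stated objective: idiomatic
-- what changed: B tokenizes read_data in one regex pass into line-with-newline pieces (plus a final newline-less fragment) and yields them directly, instead of splitting on '\n', reformatting every part with a '\n' appended, and then patching or dropping the last list entry.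
import Mathlib
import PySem

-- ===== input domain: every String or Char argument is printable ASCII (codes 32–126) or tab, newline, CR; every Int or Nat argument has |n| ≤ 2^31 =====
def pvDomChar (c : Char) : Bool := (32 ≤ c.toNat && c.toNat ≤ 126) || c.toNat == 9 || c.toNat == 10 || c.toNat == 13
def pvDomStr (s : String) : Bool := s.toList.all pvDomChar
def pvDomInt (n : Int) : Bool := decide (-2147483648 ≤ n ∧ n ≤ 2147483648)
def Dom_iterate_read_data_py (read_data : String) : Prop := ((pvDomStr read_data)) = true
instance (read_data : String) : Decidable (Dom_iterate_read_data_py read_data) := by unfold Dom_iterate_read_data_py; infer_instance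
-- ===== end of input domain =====

-- B replaces A's split/reformat/patch-last-entry pipeline by one regex-style tokenizing pass (idiomatic; return value only: both Pythons are generators, compared as the list of yielded lines).
-- ===== PORT A =====
def iterate_read_data_py (read_data : String) : List String :=
  -- data_as_list = ['{0}\n'.format(l) for l in read_data.split('\n')]
  let data_as_list : List String :=
    (PySem.Chars.splitOn read_data.toList ['\n']).map (fun l => String.ofList (l ++ ['\n']))
  -- data_as_list[-1]: str.split always returns a nonempty list, so no IndexError can occur
  match PySem.List.pyGet? data_as_list (-1) with
  | none => []  -- unreachable
  | some last =>
    if last = "\n" then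
      -- data_as_list = data_as_list[:-1]
      PySem.List.slice data_as_list none (some (-1))
    else
      -- data_as_list[-1] = data_as_list[-1][:-1]
      PySem.List.slice data_as_list none (some (-1)) ++
        [String.ofList (PySem.List.slice last.toList none (some (-1)))]

-- ===== PORT B =====
-- Hand port of re.findall(r'[^\n]*\n|[^\n]+', s): a left-to-right scan; each match is a
-- maximal newline-free run together with the following '\n' if present (exact for this regex).
def reFindallPieces : List Char → List Char → List String
  | cur, [] => if cur = [] then [] else [String.ofList cur.reverse]
  | cur, c :: rest =>
    if c = '\n' then String.ofList (cur.reverse ++ ['\n']) :: reFindallPieces [] rest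
    else reFindallPieces (c :: cur) rest

def iterate_read_data_py_alt (read_data : String) : List String :=
  reFindallPieces [] read_data.toList

-- ===== PRECONDITION & SPEC =====
def Spec_iterate_read_data_py (read_data : String) (out : List String) : Prop := out = iterate_read_data_py_alt read_data
instance (read_data : String) (out : List String) : Decidable (Spec_iterate_read_data_py read_data out) := by unfold Spec_iterate_read_data_py; infer_instance

-- ===== CLAIM (what is proved, stated in full; the proofs are below) =====
def Claim_equal_iterate_read_data_py : Prop := ∀ (read_data : String), Dom_iterate_read_data_py read_data → Spec_iterate_read_data_py read_data (iterate_read_data_py read_data)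

-- ===== LEMMAS AND PROOFS =====

-- split on '\n' as a (head, tail-parts) pair: structural version of str.split('\n')
def splitNL : List Char → List Char × List (List Char)
  | [] => ([], [])
  | c :: r =>
    let p := splitNL r
    if c = '\n' then ([], p.1 :: p.2) else (c :: p.1, p.2)

-- the common output shape: every part except the last gets '\n'; an empty last part vanishes
def outOf : List Char → List (List Char) → List String
  | p, [] => if p = [] then [] else [String.ofList p]
  | p, q :: qs => String.ofList (p ++ ['\n']) :: outOf q qs

lemma splitOn_go_nl (fuel : Nat) (l cur : List Char) (acc : List (List Char))
    (h : l.length < fuel) :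
    PySem.Chars.splitOn.go ['\n'] fuel l cur acc
      = acc.reverse ++ ((cur.reverse ++ (splitNL l).1) :: (splitNL l).2) := by
  induction fuel generalizing l cur acc with
  | zero => omega
  | succ f ih =>
    cases l with
    | nil => simp [PySem.Chars.splitOn.go, splitNL]
    | cons c r =>
      by_cases hc : c = '\n'
      · subst hc
        rw [show PySem.Chars.splitOn.go ['\n'] (f+1) ('\n'::r) cur acc
              = PySem.Chars.splitOn.go ['\n'] f r [] (cur.reverse :: acc) from by
            simp [PySem.Chars.splitOn.go, List.isPrefixOf]]
        rw [ih r [] (cur.reverse :: acc) (by simp at h; omega)]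
        simp [splitNL]
      · rw [show PySem.Chars.splitOn.go ['\n'] (f+1) (c::r) cur acc
              = PySem.Chars.splitOn.go ['\n'] f r (c :: cur) acc from by
            simp [PySem.Chars.splitOn.go, List.isPrefixOf, Ne.symm hc]]
        rw [ih r (c :: cur) acc (by simp at h; omega)]
        simp [splitNL, hc]

lemma splitOn_nl (l : List Char) :
    PySem.Chars.splitOn l ['\n'] = (splitNL l).1 :: (splitNL l).2 := by
  unfold PySem.Chars.splitOn
  rw [splitOn_go_nl _ _ _ _ (by omega)]
  simp

lemma alt_eq_outOf (l cur : List Char) :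
    reFindallPieces cur l = outOf (cur.reverse ++ (splitNL l).1) (splitNL l).2 := by
  induction l generalizing cur with
  | nil =>
    simp only [reFindallPieces, splitNL, outOf, List.append_nil]
    rcases eq_or_ne cur [] with h | h <;> simp [h]
  | cons c r ih =>
    by_cases hc : c = '\n'
    · subst hc
      simp only [reFindallPieces, splitNL]
      rw [show reFindallPieces [] r = outOf ([].reverse ++ (splitNL r).1) (splitNL r).2 from ih []]
      simp [outOf]
    · simp only [reFindallPieces, splitNL, hc, if_false]
      rw [ih (c :: cur)]
      simp

lemma a_eq_outOf (p : List Char) (ps : List (List Char)) :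
    (let data_as_list := (p :: ps).map (fun q => String.ofList (q ++ ['\n']))
     match PySem.List.pyGet? data_as_list (-1) with
     | none => []
     | some last =>
       if last = "\n" then
         PySem.List.slice data_as_list none (some (-1))
       else
         PySem.List.slice data_as_list none (some (-1)) ++
           [String.ofList (PySem.List.slice last.toList none (some (-1)))])
      = outOf p ps := by
  induction ps generalizing p with
  | nil =>
    simp only [List.map, PySem.List.pyGet?_neg_one, List.getLast?_singleton,
      PySem.List.slice_to_neg_one, outOf]
    rcases eq_or_ne p [] with h | h
    · subst h; simp [show (String.ofList ['\n'] : String) = "\n" from rfl]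
    · have hne : String.ofList (p ++ ['\n']) ≠ "\n" := by
        intro hcontra
        have h2 : p ++ ['\n'] = ['\n'] := by
          have := congrArg String.toList hcontra
          simpa [String.toList_ofList] using this
        simp at h2; exact h h2
      simp [String.toList_ofList]
  | cons q qs ih =>
    have ihq := ih q
    simp only [List.map_cons, PySem.List.pyGet?_neg_one, PySem.List.slice_to_neg_one]
      at ihq ⊢
    rw [List.getLast?_cons_cons, List.dropLast_cons₂]
    cases hl : (String.ofList (q ++ ['\n']) :: qs.map (fun q => String.ofList (q ++ ['\n']))).getLast? with
    | none => simp [List.getLast?_eq_none_iff] at hl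
    | some last =>
      rw [hl] at ihq
      simp only [outOf]
      rw [← ihq]
      split_ifs with h1 <;> simp [h1]

-- ===== VERDICT (by name: the statement is the Claim_ definition above) =====
theorem iterate_read_data_py_spec : Claim_equal_iterate_read_data_py := by
  intro s _
  unfold Spec_iterate_read_data_py
  unfold iterate_read_data_py iterate_read_data_py_alt
  rw [splitOn_nl, alt_eq_outOf]
  simpa using a_eq_outOf (splitNL s.toList).1 (splitNL s.toList).2
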